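-- pv_equiv track=rewrite | github.com/mc2lab/WANify | src/predict/genRefactoringVector.py | compareDynamicWithStatic
-- ===== SOURCE A (Python) =====
-- def compareDynamicWithStatic(staticVals, dynamicVals, NUM_DATACENTERS):
-- 	err50 = 0
-- 	err100 = 0
-- 	err150 = 0
-- 	err200 = 0
-- 	err250 = 0
-- 	err300 = 0
-- 	err300p = 0
-- 	for ind in range(NUM_DATACENTERS * NUM_DATACENTERS):
-- 		if (dynamicVals[0][ind] > 0):
-- 			differenceVal = abs(staticVals[0][ind] - dynamicVals[0][ind])
-- 			if(differenceVal>30 and differenceVal<=50):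
-- 				err50 += 1
-- 			elif(differenceVal>50 and differenceVal<=100):
-- 				err100 += 1
-- 			elif(differenceVal>100 and differenceVal<=150):
-- 				err150 += 1
-- 			elif(differenceVal>150 and differenceVal<=200):
-- 				err200 += 1
-- 			elif(differenceVal>200 and differenceVal<=250):
-- 				err250 += 1
-- 			elif(differenceVal>250 and differenceVal<=300):
-- 				err300 += 1
-- 			elif(differenceVal > 300):
-- 				err300p += 1
-- 	return err50, err100, err150, err200, err250, err300, err300p
-- ===== SOURCE B (Python) =====
-- def compareDynamicWithStatic(staticVals, dynamicVals, NUM_DATACENTERS):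
--     diffs = [abs(staticVals[0][i] - dynamicVals[0][i])
--              for i in range(NUM_DATACENTERS * NUM_DATACENTERS)
--              if dynamicVals[0][i] > 0]
--     over = [sum(1 for d in diffs if d > b) for b in (30, 50, 100, 150, 200, 250, 300)]
--     return (over[0] - over[1], over[1] - over[2], over[2] - over[3],
--             over[3] - over[4], over[4] - over[5], over[5] - over[6], over[6])
-- ===== Notes on version B (the rewrite author's own statement) =====
-- stated objective: alternative
-- what changed: Two-stage cumulative-count formulation: B first materialises the list of abs differences for active cells, then computes for each boundary b the cumulative count of differences exceeding b and returns adjacent differences of these counts, instead of A's single pass that classifies each cell with a seven-way if/elif cascade into seven accumulators.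
import Mathlib
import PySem

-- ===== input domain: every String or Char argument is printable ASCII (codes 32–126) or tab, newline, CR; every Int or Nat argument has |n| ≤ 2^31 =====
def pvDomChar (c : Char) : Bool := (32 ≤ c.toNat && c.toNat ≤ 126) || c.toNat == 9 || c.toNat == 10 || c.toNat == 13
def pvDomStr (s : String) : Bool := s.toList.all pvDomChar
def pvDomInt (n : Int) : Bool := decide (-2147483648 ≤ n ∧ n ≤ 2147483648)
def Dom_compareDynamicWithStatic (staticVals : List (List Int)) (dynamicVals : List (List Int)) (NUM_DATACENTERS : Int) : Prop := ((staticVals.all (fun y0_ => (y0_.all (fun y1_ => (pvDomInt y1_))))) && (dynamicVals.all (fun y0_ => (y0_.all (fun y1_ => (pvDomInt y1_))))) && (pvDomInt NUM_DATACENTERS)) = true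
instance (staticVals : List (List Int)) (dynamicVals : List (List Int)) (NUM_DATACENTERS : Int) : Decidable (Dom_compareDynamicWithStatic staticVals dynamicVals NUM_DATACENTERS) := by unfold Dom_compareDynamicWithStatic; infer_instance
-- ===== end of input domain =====

-- B replaces A's single-pass seven-way if/elif classification with a two-stage
-- cumulative-count computation: collect the diffs, count how many exceed each
-- boundary, return adjacent differences of those counts (objective: alternative).

-- ===== PORT A =====
-- loop body of A's for-loop (the seven-accumulator cascade), step for step
def pvStepA (staticVals : List (List Int)) (dynamicVals : List (List Int))
    (s : Int × Int × Int × Int × Int × Int × Int) (ind : Int) :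
    Int × Int × Int × Int × Int × Int × Int :=
  let dv := (PySem.List.pyGet? ((PySem.List.pyGet? dynamicVals 0).getD []) ind).getD 0
  if dv > 0 then
    let sv := (PySem.List.pyGet? ((PySem.List.pyGet? staticVals 0).getD []) ind).getD 0
    let differenceVal := |sv - dv|
    match s with
    | (e50, e100, e150, e200, e250, e300, e300p) =>
      if differenceVal > 30 ∧ differenceVal ≤ 50 then (e50 + 1, e100, e150, e200, e250, e300, e300p)
      else if differenceVal > 50 ∧ differenceVal ≤ 100 then (e50, e100 + 1, e150, e200, e250, e300, e300p)
      else if differenceVal > 100 ∧ differenceVal ≤ 150 then (e50, e100, e150 + 1, e200, e250, e300, e300p)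
      else if differenceVal > 150 ∧ differenceVal ≤ 200 then (e50, e100, e150, e200 + 1, e250, e300, e300p)
      else if differenceVal > 200 ∧ differenceVal ≤ 250 then (e50, e100, e150, e200, e250 + 1, e300, e300p)
      else if differenceVal > 250 ∧ differenceVal ≤ 300 then (e50, e100, e150, e200, e250, e300 + 1, e300p)
      else if differenceVal > 300 then (e50, e100, e150, e200, e250, e300, e300p + 1)
      else (e50, e100, e150, e200, e250, e300, e300p)
  else s

def compareDynamicWithStatic (staticVals : List (List Int)) (dynamicVals : List (List Int)) (NUM_DATACENTERS : Int) : Int × Int × Int × Int × Int × Int × Int :=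
  (PySem.List.pyRange 0 (NUM_DATACENTERS * NUM_DATACENTERS) 1).foldl
    (pvStepA staticVals dynamicVals) (0, 0, 0, 0, 0, 0, 0)

-- ===== PORT B =====
-- the diffs list comprehension of Source B (filtered accumulation over the index range)
def pvDiffsB (staticVals : List (List Int)) (dynamicVals : List (List Int)) (L : List Int) : List Int :=
  L.foldl (fun acc i =>
    let dv := (PySem.List.pyGet? ((PySem.List.pyGet? dynamicVals 0).getD []) i).getD 0
    if dv > 0 then
      let sv := (PySem.List.pyGet? ((PySem.List.pyGet? staticVals 0).getD []) i).getD 0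
      acc ++ [|sv - dv|]
    else acc) []

def compareDynamicWithStatic_alt (staticVals : List (List Int)) (dynamicVals : List (List Int)) (NUM_DATACENTERS : Int) : Int × Int × Int × Int × Int × Int × Int :=
  let diffs := pvDiffsB staticVals dynamicVals (PySem.List.pyRange 0 (NUM_DATACENTERS * NUM_DATACENTERS) 1)
  let overs := ([30, 50, 100, 150, 200, 250, 300] : List Int).map
    (fun b => ((diffs.countP (fun x => b < x)) : Int))
  (overs.getD 0 0 - overs.getD 1 0, overs.getD 1 0 - overs.getD 2 0,
   overs.getD 2 0 - overs.getD 3 0, overs.getD 3 0 - overs.getD 4 0,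
   overs.getD 4 0 - overs.getD 5 0, overs.getD 5 0 - overs.getD 6 0, overs.getD 6 0)

-- ===== PRECONDITION & SPEC =====
-- Pre_ excludes exactly the inputs where the Python A raises IndexError: when the loop runs,
-- dynamicVals[0] must exist and be long enough, and staticVals[0][ind] must exist whenever it
-- is actually read (i.e. when dynamicVals[0][ind] > 0).
def Pre_compareDynamicWithStatic (staticVals : List (List Int)) (dynamicVals : List (List Int)) (NUM_DATACENTERS : Int) : Prop :=
  NUM_DATACENTERS * NUM_DATACENTERS ≤ 0 ∨
    (dynamicVals ≠ [] ∧
     (NUM_DATACENTERS * NUM_DATACENTERS).toNat ≤ (dynamicVals.headD []).length ∧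
     ∀ i < (NUM_DATACENTERS * NUM_DATACENTERS).toNat,
       (dynamicVals.headD []).getD i 0 > 0 →
         staticVals ≠ [] ∧ i < (staticVals.headD []).length)
instance (staticVals : List (List Int)) (dynamicVals : List (List Int)) (NUM_DATACENTERS : Int) : Decidable (Pre_compareDynamicWithStatic staticVals dynamicVals NUM_DATACENTERS) := by unfold Pre_compareDynamicWithStatic; infer_instance

def pvWitness_compareDynamicWithStatic : List (List Int) × List (List Int) × Int :=
  ([[100, 0]], [[1, 5]], 1)

def Spec_compareDynamicWithStatic (staticVals : List (List Int)) (dynamicVals : List (List Int)) (NUM_DATACENTERS : Int) (out : Int × Int × Int × Int × Int × Int × Int) : Prop := out = compareDynamicWithStatic_alt staticVals dynamicVals NUM_DATACENTERS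
instance (staticVals : List (List Int)) (dynamicVals : List (List Int)) (NUM_DATACENTERS : Int) (out : Int × Int × Int × Int × Int × Int × Int) : Decidable (Spec_compareDynamicWithStatic staticVals dynamicVals NUM_DATACENTERS out) := by unfold Spec_compareDynamicWithStatic; infer_instance

-- ===== CLAIM (what is proved, stated in full; the proofs are below) =====
def Claim_equal_compareDynamicWithStatic : Prop := ∀ (staticVals : List (List Int)) (dynamicVals : List (List Int)) (NUM_DATACENTERS : Int), Dom_compareDynamicWithStatic staticVals dynamicVals NUM_DATACENTERS → Pre_compareDynamicWithStatic staticVals dynamicVals NUM_DATACENTERS → Spec_compareDynamicWithStatic staticVals dynamicVals NUM_DATACENTERS (compareDynamicWithStatic staticVals dynamicVals NUM_DATACENTERS)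

-- ===== LEMMAS AND PROOFS =====

-- the filtered diffs of the index list, as a filterMap (proof-side characterisation)
def pvD (staticVals : List (List Int)) (dynamicVals : List (List Int)) (L : List Int) : List Int :=
  L.filterMap (fun i =>
    let dv := (PySem.List.pyGet? ((PySem.List.pyGet? dynamicVals 0).getD []) i).getD 0
    if dv > 0 then
      some |((PySem.List.pyGet? ((PySem.List.pyGet? staticVals 0).getD []) i).getD 0) - dv|
    else none)

lemma pvDiffsB_acc (staticVals dynamicVals : List (List Int)) :
    ∀ (L : List Int) (acc : List Int),
      L.foldl (fun acc i =>
        let dv := (PySem.List.pyGet? ((PySem.List.pyGet? dynamicVals 0).getD []) i).getD 0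
        if dv > 0 then
          let sv := (PySem.List.pyGet? ((PySem.List.pyGet? staticVals 0).getD []) i).getD 0
          acc ++ [|sv - dv|]
        else acc) acc = acc ++ pvD staticVals dynamicVals L := by
  intro L
  induction L with
  | nil => intro acc; simp [pvD]
  | cons x xs ih =>
    intro acc
    simp only [List.foldl_cons]
    by_cases hdv : ((PySem.List.pyGet? ((PySem.List.pyGet? dynamicVals 0).getD []) x).getD 0) > 0
    · simp only [hdv, ih, pvD, List.filterMap_cons]
      simp
    · simp only [ih, pvD, List.filterMap_cons, if_neg hdv]

-- A's fold adds, to each accumulator, the count of diffs in its interval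
lemma pvFoldA_counts (staticVals dynamicVals : List (List Int)) :
    ∀ (L : List Int) (a b c d e f g : Int),
      L.foldl (pvStepA staticVals dynamicVals) (a, b, c, d, e, f, g) =
        (a + ((pvD staticVals dynamicVals L).countP (fun x => 30 < x ∧ x ≤ 50) : Int),
         b + ((pvD staticVals dynamicVals L).countP (fun x => 50 < x ∧ x ≤ 100) : Int),
         c + ((pvD staticVals dynamicVals L).countP (fun x => 100 < x ∧ x ≤ 150) : Int),
         d + ((pvD staticVals dynamicVals L).countP (fun x => 150 < x ∧ x ≤ 200) : Int),
         e + ((pvD staticVals dynamicVals L).countP (fun x => 200 < x ∧ x ≤ 250) : Int),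
         f + ((pvD staticVals dynamicVals L).countP (fun x => 250 < x ∧ x ≤ 300) : Int),
         g + ((pvD staticVals dynamicVals L).countP (fun x => 300 < x) : Int)) := by
  intro L
  induction L with
  | nil => intro a b c d e f g; simp [pvD]
  | cons x xs ih =>
    intro a b c d e f g
    simp only [List.foldl_cons, pvStepA]
    by_cases hdv : ((PySem.List.pyGet? ((PySem.List.pyGet? dynamicVals 0).getD []) x).getD 0) > 0
    · rw [if_pos hdv]
      have hD : pvD staticVals dynamicVals (x :: xs) =
          |((PySem.List.pyGet? ((PySem.List.pyGet? staticVals 0).getD []) x).getD 0) -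
           ((PySem.List.pyGet? ((PySem.List.pyGet? dynamicVals 0).getD []) x).getD 0)| ::
          pvD staticVals dynamicVals xs := by
        simp [pvD, hdv]
      rw [hD]
      generalize |((PySem.List.pyGet? ((PySem.List.pyGet? staticVals 0).getD []) x).getD 0) -
        ((PySem.List.pyGet? ((PySem.List.pyGet? dynamicVals 0).getD []) x).getD 0)| = diff
      split_ifs with h1 h2 h3 h4 h5 h6 h7 <;>
        · rw [ih]
          simp only [List.countP_cons, decide_eq_true_eq, Prod.mk.injEq]
          refine ⟨?_, ?_, ?_, ?_, ?_, ?_, ?_⟩ <;> (split_ifs <;> push_cast <;> omega)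
    · rw [if_neg hdv]
      have hD : pvD staticVals dynamicVals (x :: xs) = pvD staticVals dynamicVals xs := by
        simp [pvD, hdv]
      rw [hD, ih]

-- counting above lo splits into the interval (lo,hi] and above hi
lemma pv_cnt_split (lo hi : Int) (h : lo ≤ hi) (l : List Int) :
    l.countP (fun x => lo < x) =
      l.countP (fun x => lo < x ∧ x ≤ hi) + l.countP (fun x => hi < x) := by
  induction l with
  | nil => simp
  | cons x xs ih =>
    simp only [List.countP_cons, ih, decide_eq_true_eq]
    split_ifs <;> omega

-- ===== VERDICT (by name: the statement is the Claim_ definition above) =====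
theorem compareDynamicWithStatic_spec : Claim_equal_compareDynamicWithStatic := by
  intro staticVals dynamicVals N _ _
  unfold Spec_compareDynamicWithStatic compareDynamicWithStatic compareDynamicWithStatic_alt pvDiffsB
  rw [pvDiffsB_acc, pvFoldA_counts]
  simp only [List.nil_append, List.map_cons, List.map_nil, List.getD, List.getElem?_cons_zero,
    List.getElem?_cons_succ, Option.getD_some]
  have s1 := pv_cnt_split 30 50 (by omega) (pvD staticVals dynamicVals (PySem.List.pyRange 0 (N * N) 1))
  have s2 := pv_cnt_split 50 100 (by omega) (pvD staticVals dynamicVals (PySem.List.pyRange 0 (N * N) 1))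
  have s3 := pv_cnt_split 100 150 (by omega) (pvD staticVals dynamicVals (PySem.List.pyRange 0 (N * N) 1))
  have s4 := pv_cnt_split 150 200 (by omega) (pvD staticVals dynamicVals (PySem.List.pyRange 0 (N * N) 1))
  have s5 := pv_cnt_split 200 250 (by omega) (pvD staticVals dynamicVals (PySem.List.pyRange 0 (N * N) 1))
  have s6 := pv_cnt_split 250 300 (by omega) (pvD staticVals dynamicVals (PySem.List.pyRange 0 (N * N) 1))
  simp only [Prod.mk.injEq]
  refine ⟨?_, ?_, ?_, ?_, ?_, ?_, ?_⟩ <;> omega
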